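-- pv_equiv track=rewrite | github.com/MichalMachura/LittleNet | TRAIN/utils.py | shb_params
-- ===== SOURCE A (Python) =====
-- def shb_params(width,
--                  byte=9,
--                  shb=18,
--                  shb_len=1024):
--
--     if width <= byte:
--         if width == 2:
--             # 2 baytes each of 4 two bits values
--             bram_width = 2*4*width
--             bram_len = shb_len*8
--         elif width == 4:
--             # 2 baytes each of 2 four bits values
--             bram_width = 2*2*width
--             bram_len = shb_len*4
--         elif width == 8 or width == 9:
--             # 2 baytes each of 2 four bits values
--             bram_width = 2*width
--             bram_len = shb_len*2
--         bram_blk = 1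
--
--     else:
--         i = 0
--         while True:
--             # check multiplication of shb
--             if width <= (2*byte)*i:
--                 break
--             i += 1
--
--         bram_width = (2*byte)*i
--         bram_len = shb_len
--         bram_blk = i
--
--     return bram_width, bram_len, bram_blk
-- ===== SOURCE B (Python) =====
-- def shb_params(width,
--                  byte=9,
--                  shb=18,
--                  shb_len=1024):
--     if width <= byte:
--         bram_width, len_factor = {2: (16, 8), 4: (16, 4), 8: (16, 2), 9: (18, 2)}[width]
--         return bram_width, shb_len * len_factor, 1
--     # smallest i >= 0 with width <= 2*byte*i, as a closed-form ceiling
--     i = 0 if width <= 0 else -(-width // (2 * byte))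
--     return 2 * byte * i, shb_len, i
-- ===== Notes on version B (the rewrite author's own statement) =====
-- stated objective: simpler
-- what changed: The unbounded while-loop search for the smallest block count i is replaced by a closed-form ceiling division, and the nested if/elif ladder of the small-width branch is replaced by a single table lookup.
-- outside the precondition, e.g. on shb_params(3, 9, 18, 1024): A raises UnboundLocalError, B raises KeyError; on shb_params(5, 0, 18, 1024): A does not finish within the time limit, B raises ZeroDivisionError
import Mathlib
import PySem

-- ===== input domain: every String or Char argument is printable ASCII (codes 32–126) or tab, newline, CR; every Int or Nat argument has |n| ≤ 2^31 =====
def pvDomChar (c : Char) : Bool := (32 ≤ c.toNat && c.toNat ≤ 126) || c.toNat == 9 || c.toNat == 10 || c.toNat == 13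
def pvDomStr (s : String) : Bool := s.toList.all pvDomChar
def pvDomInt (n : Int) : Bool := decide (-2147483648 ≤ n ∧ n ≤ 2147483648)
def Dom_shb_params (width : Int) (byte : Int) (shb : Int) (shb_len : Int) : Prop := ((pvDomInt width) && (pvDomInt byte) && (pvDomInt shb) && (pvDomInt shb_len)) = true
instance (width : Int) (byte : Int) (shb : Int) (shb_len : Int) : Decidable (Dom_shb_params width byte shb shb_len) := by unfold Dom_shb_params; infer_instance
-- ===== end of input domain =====

-- B replaces the while-loop search with a closed-form ceiling division and the if/elif
-- ladder with a table lookup (objective: simpler).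

-- ===== PORT A =====
-- the 'while True' search loop: smallest i with width <= 2*byte*i; fuel only makes the
-- recursion total (inside Pre_ the fuel is never exhausted, see shbLoopA_eq below)
def shbLoopA (width byte : Int) (i : Int) : Nat → Int
  | 0 => i
  | fuel + 1 => if width ≤ 2 * byte * i then i else shbLoopA width byte (i + 1) fuel

def shb_params (width : Int) (byte : Int) (shb : Int) (shb_len : Int) : Int × Int × Int :=
  if width ≤ byte then
    if width = 2 then (2 * 4 * width, shb_len * 8, 1)
    else if width = 4 then (2 * 2 * width, shb_len * 4, 1)
    else if width = 8 ∨ width = 9 then (2 * width, shb_len * 2, 1)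
    else (0, 0, 1)  -- Python raises UnboundLocalError here; excluded by Pre_shb_params
  else
    let i := shbLoopA width byte 0 (width.toNat + 1)
    (2 * byte * i, shb_len, i)

-- ===== PORT B =====
def shbTable : PySem.Dict Int (Int × Int) :=
  PySem.Dict.ofList [(2, (16, 8)), (4, (16, 4)), (8, (16, 2)), (9, (18, 2))]

def shb_params_alt (width : Int) (byte : Int) (shb : Int) (shb_len : Int) : Int × Int × Int :=
  if width ≤ byte then
    -- Python B raises KeyError off the table; excluded by Pre_shb_params
    let wf := (PySem.Dict.get? shbTable width).getD (0, 0)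
    (wf.1, shb_len * wf.2, 1)
  else
    let i := if width ≤ 0 then 0 else -(PySem.Int.floordiv (-width) (2 * byte))
    (2 * byte * i, shb_len, i)

-- ===== PRECONDITION & SPEC =====
-- Pre_ excludes (a) width ≤ byte with width ∉ {2,4,8,9}, where A raises UnboundLocalError,
-- and (b) width > byte with width > 0 and byte ≤ 0, where A's while-loop never terminates.
def Pre_shb_params (width : Int) (byte : Int) (shb : Int) (shb_len : Int) : Prop :=
  (width ≤ byte → (width = 2 ∨ width = 4 ∨ width = 8 ∨ width = 9)) ∧
  (byte < width → (width ≤ 0 ∨ 0 < byte))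
instance (width : Int) (byte : Int) (shb : Int) (shb_len : Int) : Decidable (Pre_shb_params width byte shb shb_len) := by unfold Pre_shb_params; infer_instance

def pvWitness_shb_params : Int × Int × Int × Int := (24, 9, 18, 1024)

def Spec_shb_params (width : Int) (byte : Int) (shb : Int) (shb_len : Int) (out : Int × Int × Int) : Prop := out = shb_params_alt width byte shb shb_len
instance (width : Int) (byte : Int) (shb : Int) (shb_len : Int) (out : Int × Int × Int) : Decidable (Spec_shb_params width byte shb shb_len out) := by unfold Spec_shb_params; infer_instance

-- ===== CLAIM (what is proved, stated in full; the proofs are below) =====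
def Claim_equal_shb_params : Prop := ∀ (width : Int) (byte : Int) (shb : Int) (shb_len : Int), Dom_shb_params width byte shb shb_len → Pre_shb_params width byte shb shb_len → Spec_shb_params width byte shb shb_len (shb_params width byte shb shb_len)

-- ===== LEMMAS AND PROOFS =====

-- the loop computes c, the smallest i with width ≤ 2*byte*i, provided enough fuel
lemma shbLoopA_eq (width byte c : Int)
    (hc1 : width ≤ 2 * byte * c) (hc2 : ∀ j : Int, j < c → 2 * byte * j < width) :
    ∀ (fuel : Nat) (i : Int), i ≤ c → c - i < (fuel : Int) →
      shbLoopA width byte i fuel = c := by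
  intro fuel
  induction fuel with
  | zero => intro i hi hf; omega
  | succ n ih =>
      intro i hi hf
      simp only [shbLoopA]
      by_cases h : width ≤ 2 * byte * i
      · simp only [h, if_true]
        by_contra hne
        have : i < c := lt_of_le_of_ne hi (by omega)
        exact absurd (hc2 i this) (by omega)
      · simp only [h, if_false]
        have hic : i < c := by
          rcases lt_or_eq_of_le hi with h' | h'
          · exact h'
          · exact absurd (h' ▸ hc1) h
        exact ih (i + 1) (by omega) (by omega)

lemma ceil_bounds (width byte : Int) (hb : 0 < byte) (hw : 0 < width) :
    width ≤ 2 * byte * (-(PySem.Int.floordiv (-width) (2 * byte))) ∧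
    (∀ j : Int, j < -(PySem.Int.floordiv (-width) (2 * byte)) → 2 * byte * j < width) := by
  have hd : (0 : Int) < 2 * byte := by omega
  have hfd : PySem.Int.floordiv (-width) (2 * byte) = (-width) / (2 * byte) := by
    simp [PySem.Int.floordiv, Int.fdiv_eq_ediv_of_nonneg, le_of_lt hd]
  set e : Int := (-width) / (2 * byte) with he
  have hmod := Int.mul_ediv_add_emod (-width) (2 * byte)
  have hm0 : 0 ≤ (-width) % (2 * byte) := Int.emod_nonneg _ (by omega)
  have hm1 : (-width) % (2 * byte) < 2 * byte := Int.emod_lt_of_pos _ hd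
  have h1 : 2 * byte * e ≤ -width := by rw [he]; omega
  have h2 : -width < 2 * byte * (e + 1) := by rw [mul_add]; rw [he]; omega
  constructor
  · rw [hfd]; nlinarith
  · intro j hj
    rw [hfd] at hj
    have : j ≤ -e - 1 := by omega
    have hm : 2 * byte * j ≤ 2 * byte * (-e - 1) :=
      mul_le_mul_of_nonneg_left this (by omega)
    nlinarith

theorem shb_params_spec : Claim_equal_shb_params := by
  intro width byte shb shb_len _ hpre
  obtain ⟨hsm, hlg⟩ := hpre
  unfold Spec_shb_params shb_params shb_params_alt
  by_cases hle : width ≤ byte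
  · simp only [hle, if_true]
    have t2 : (PySem.Dict.get? shbTable 2).getD (0, 0) = (16, 8) := by decide
    have t4 : (PySem.Dict.get? shbTable 4).getD (0, 0) = (16, 4) := by decide
    have t8 : (PySem.Dict.get? shbTable 8).getD (0, 0) = (16, 2) := by decide
    have t9 : (PySem.Dict.get? shbTable 9).getD (0, 0) = (18, 2) := by decide
    rcases hsm hle with h | h | h | h <;> subst h <;>
      simp only [t2, t4, t8, t9] <;> norm_num
  · simp only [hle, if_false]
    have hlt : byte < width := by omega
    by_cases hw : width ≤ 0
    · have h0 : shbLoopA width byte 0 (width.toNat + 1) = 0 := by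
        simp only [shbLoopA]
        rw [if_pos (show width ≤ 2 * byte * 0 by omega)]
      simp [h0, hw]
    · have hwp : 0 < width := by omega
      have hb : 0 < byte := by rcases hlg hlt with h | h; omega; exact h
      set c : Int := -(PySem.Int.floordiv (-width) (2 * byte)) with hcdef
      obtain ⟨hc1, hc2⟩ := ceil_bounds width byte hb hwp
      -- c ≤ width: otherwise minimality at j = width gives 2*byte*width < width
      have hcw : c ≤ width := by
        by_contra hclt
        have := hc2 width (by omega)
        nlinarith
      have hc0 : 0 < c := by nlinarith
      have hloop : shbLoopA width byte 0 (width.toNat + 1) = c := by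
        apply shbLoopA_eq width byte c hc1 hc2
        · omega
        · push_cast; omega
      simp [hloop, hw]

-- ===== VERDICT (by name: the statement is the Claim_ definition above) =====
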